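-- pv_equiv track=rewrite | github.com/amayasarmiento/Python-and-command-line-course | exam_orf.py | count_sequences_between_codons
-- ===== SOURCE A (Python) =====
-- def count_sequences_between_codons(merged_sequences):
--     all_sequence_lengths = {}  # Dictionary to store sequence lengths for each ORF
--
--     for frame, merged_sequence in merged_sequences.items():
--         sequence_lengths = []
--         in_sequence = False
--         current_length = 0
--
--         for amino_acid in merged_sequence:
--             if amino_acid == 'M' and not in_sequence:
--                 # Start of a new sequence
--                 in_sequence = True
--                 current_length = 0
--             elif amino_acid == '*' and in_sequence:
--                 # End of the current sequence
--                 in_sequence = False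
--                 sequence_lengths.append(current_length)
--             elif in_sequence:
--                 # Inside a sequence, increment length
--                 current_length += 1
--
--         # Store sequence lengths for the current ORF
--         all_sequence_lengths[frame] = sequence_lengths
--
--     return all_sequence_lengths
-- ===== SOURCE B (Python) =====
-- def count_sequences_between_codons(merged_sequences):
--     # Jump between codons with str.find instead of walking a char-by-char state machine.
--     return {frame: _orf_lengths(seq) for frame, seq in merged_sequences.items()}
--
--
-- def _orf_lengths(seq):
--     i = seq.find('M')
--     if i == -1:
--         return []
--     j = seq.find('*', i)
--     if j == -1:
--         return []
--     return [j - i - 1] + _orf_lengths(seq[j + 1:])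
-- ===== Notes on version B (the rewrite author's own statement) =====
-- stated objective: alternative
-- what changed: Replaces A's per-character in_sequence/current_length state machine with a recursive two-pointer scan that jumps with str.find from each 'M' to the next '*' and emits j-i-1 directly.
import Mathlib
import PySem

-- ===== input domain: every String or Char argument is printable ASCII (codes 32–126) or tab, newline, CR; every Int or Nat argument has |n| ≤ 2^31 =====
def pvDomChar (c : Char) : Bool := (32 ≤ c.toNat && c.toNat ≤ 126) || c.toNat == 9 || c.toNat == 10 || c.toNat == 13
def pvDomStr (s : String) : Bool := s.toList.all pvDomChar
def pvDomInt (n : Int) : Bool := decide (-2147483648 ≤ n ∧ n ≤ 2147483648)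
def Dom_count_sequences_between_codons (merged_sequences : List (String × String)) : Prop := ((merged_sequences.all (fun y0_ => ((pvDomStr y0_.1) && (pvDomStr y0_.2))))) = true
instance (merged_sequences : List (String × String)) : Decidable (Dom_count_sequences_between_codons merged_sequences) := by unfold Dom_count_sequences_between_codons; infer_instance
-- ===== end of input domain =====

-- B replaces A's per-character in_sequence/current_length state machine by a recursive scan that
-- jumps with find from each 'M' to the next '*' (same cost); equal return values are proved below.

-- ===== PORT A =====
-- state = (in_sequence, current_length, sequence_lengths); one step of A's inner for-loop
def pvStepA (st : Bool × Int × List Int) (c : Char) : Bool × Int × List Int :=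
  if c = 'M' ∧ st.1 = false then (true, 0, st.2.2)
  else if c = '*' ∧ st.1 = true then (false, st.2.1, st.2.2 ++ [st.2.1])
  else if st.1 = true then (st.1, st.2.1 + 1, st.2.2)
  else st

def pvLensA (s : String) : List Int :=
  (s.toList.foldl pvStepA (false, 0, [])).2.2

-- the dict all_sequence_lengths, built by per-frame assignment; returned as its items
def count_sequences_between_codons (merged_sequences : List (String × String)) : List (String × List Int) :=
  (merged_sequences.foldl (fun d fs => d.insert fs.1 (pvLensA fs.2))
    (PySem.Dict.empty : PySem.Dict String (List Int))).items

-- ===== PORT B =====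
-- characterization of find on a one-char pattern; cited by pvOrfLens's decreasing_by
theorem pv_find_single (cs : List Char) (c : Char) (h : PySem.Chars.find cs [c] ≠ -1) :
    ∃ n : Nat, PySem.Chars.find cs [c] = (n : Int) ∧ n < cs.length ∧
      cs.drop n = c :: cs.drop (n + 1) ∧ c ∉ cs.take n := by
  have h0 : 0 ≤ PySem.Chars.find cs [c] := by
    have := PySem.Chars.neg_one_le_find cs [c]; omega
  obtain ⟨hpre, hmin⟩ := PySem.Chars.find_spec h0
  refine ⟨(PySem.Chars.find cs [c]).toNat, (Int.toNat_of_nonneg h0).symm, ?_, ?_, ?_⟩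
  · obtain ⟨t, ht⟩ := hpre
    have : cs.drop (PySem.Chars.find cs [c]).toNat ≠ [] := by simp [← ht]
    simpa [List.drop_eq_nil_iff] using this
  · obtain ⟨t, ht⟩ := hpre
    have htail : t = cs.drop ((PySem.Chars.find cs [c]).toNat + 1) := by
      have := congrArg List.tail ht
      simpa [List.tail_drop] using this
    rw [← ht, htail]; rfl
  · intro hmem
    obtain ⟨m, hm, hget⟩ := List.getElem_of_mem hmem
    have hmlt : m < (PySem.Chars.find cs [c]).toNat := by
      simp [List.length_take] at hm; omega
    have hmlen : m < cs.length := by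
      simp [List.length_take] at hm; omega
    apply hmin m hmlt
    rw [List.drop_eq_getElem_cons hmlen]
    have hc : cs[m] = c := by
      rw [List.getElem_take] at hget; exact hget
    rw [hc]
    exact ⟨_, rfl⟩

-- _orf_lengths: i = seq.find('M'); j = seq.find('*', i); emit j - i - 1 and recurse on seq[j+1:]
def pvOrfLens (cs : List Char) : List Int :=
  let i := PySem.Chars.find cs ['M']
  if hi : i = -1 then []
  else
    let j := PySem.Chars.findFrom cs ['*'] i none
    if hj : j = -1 then []
    else (j - i - 1) :: pvOrfLens (PySem.List.slice cs (some (j + 1)) none)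
termination_by cs.length
decreasing_by
  have hj' : PySem.Chars.findFrom cs ['*'] (PySem.Chars.find cs ['M']) none ≠ -1 := hj
  obtain ⟨n, hn, hnlt, hdrop, htake⟩ := pv_find_single cs 'M' hi
  rw [hn] at hj' ⊢
  rw [PySem.Chars.findFrom_natCast cs ['*'] n (le_of_lt hnlt)] at hj' ⊢
  by_cases hf : PySem.Chars.find (List.drop n cs) ['*'] = -1
  · simp [hf] at hj'
  · obtain ⟨m, hm, hmlt, _, _⟩ := pv_find_single (cs.drop n) '*' hf
    rw [if_neg hf, hm]
    have : ((n : Int) + m + 1) = ((n + m + 1 : Nat) : Int) := by push_cast; ring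
    rw [this, PySem.List.slice_from_natCast]
    simp only [List.length_drop]
    rw [List.length_drop] at hmlt
    omega

-- the dict comprehension of B, built by insertion over .items(); returned as its items
def count_sequences_between_codons_alt (merged_sequences : List (String × String)) : List (String × List Int) :=
  (merged_sequences.foldl (fun d fs => d.insert fs.1 (pvOrfLens fs.2.toList))
    (PySem.Dict.empty : PySem.Dict String (List Int))).items

-- ===== PRECONDITION & SPEC =====
def Spec_count_sequences_between_codons (merged_sequences : List (String × String)) (out : List (String × List Int)) : Prop := out = count_sequences_between_codons_alt merged_sequences
instance (merged_sequences : List (String × String)) (out : List (String × List Int)) : Decidable (Spec_count_sequences_between_codons merged_sequences out) := by unfold Spec_count_sequences_between_codons; infer_instance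

-- ===== CLAIM (what is proved, stated in full; the proofs are below) =====
def Claim_equal_count_sequences_between_codons : Prop := ∀ (merged_sequences : List (String × String)), Dom_count_sequences_between_codons merged_sequences → Spec_count_sequences_between_codons merged_sequences (count_sequences_between_codons merged_sequences)

-- ===== LEMMAS AND PROOFS =====

theorem pv_step_false (c : Char) (x : Int) (acc : List Int) (hc : c ≠ 'M') :
    pvStepA (false, x, acc) c = (false, x, acc) := by simp [pvStepA, hc]

theorem pv_step_M (x : Int) (acc : List Int) :
    pvStepA (false, x, acc) 'M' = (true, 0, acc) := by simp [pvStepA]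

theorem pv_step_true (c : Char) (k : Int) (acc : List Int) (hc : c ≠ '*') :
    pvStepA (true, k, acc) c = (true, k + 1, acc) := by simp [pvStepA, hc]

theorem pv_step_star (k : Int) (acc : List Int) :
    pvStepA (true, k, acc) '*' = (false, k, acc ++ [k]) := by simp [pvStepA]

-- L1: no 'M' ahead, out of sequence: nothing happens
theorem pv_L1 (cs : List Char) (x : Int) (acc : List Int) (h : 'M' ∉ cs) :
    cs.foldl pvStepA (false, x, acc) = (false, x, acc) := by
  induction cs with
  | nil => rfl
  | cons c cs ih =>
    rw [List.foldl_cons, pv_step_false c x acc (fun hc => h (hc ▸ List.mem_cons_self))]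
    exact ih (fun hm => h (List.mem_cons_of_mem _ hm))

-- L2: in sequence, no '*' ahead: every char counts
theorem pv_L2 (cs : List Char) (k : Int) (acc : List Int) (h : '*' ∉ cs) :
    cs.foldl pvStepA (true, k, acc) = (true, k + cs.length, acc) := by
  induction cs generalizing k with
  | nil => simp
  | cons c cs ih =>
    rw [List.foldl_cons, pv_step_true c k acc (fun hc => h (hc ▸ List.mem_cons_self))]
    rw [ih (k + 1) (fun hm => h (List.mem_cons_of_mem _ hm))]
    simp; ring

-- L3: the list of finished lengths only ever gets appended to
theorem pv_L3 (cs : List Char) (b : Bool) (k : Int) (acc : List Int) :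
    (cs.foldl pvStepA (b, k, acc)).2.2 = acc ++ (cs.foldl pvStepA (b, k, [])).2.2 := by
  induction cs generalizing b k acc with
  | nil => simp
  | cons c cs ih =>
    simp only [List.foldl_cons, pvStepA]
    split_ifs with h1 h2 h3
    · exact ih true 0 acc
    · rw [ih false k (acc ++ [k]), ih false k ([] ++ [k]), ih false k []]
      simp
    · exact ih b (k + 1) acc
    · exact ih b k acc

-- L4: the stale counter is irrelevant while out of sequence
theorem pv_L4 (cs : List Char) (x y : Int) (acc : List Int) :
    (cs.foldl pvStepA (false, x, acc)).2.2 = (cs.foldl pvStepA (false, y, acc)).2.2 := by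
  induction cs generalizing acc with
  | nil => rfl
  | cons c cs ih =>
    by_cases hc : c = 'M'
    · subst hc
      rw [List.foldl_cons, List.foldl_cons, pv_step_M x acc, pv_step_M y acc]
    · rw [List.foldl_cons, List.foldl_cons, pv_step_false c x acc hc, pv_step_false c y acc hc]
      exact ih acc

theorem pv_singleton_not_infix {c : Char} {cs : List Char} (h : c ∉ cs) :
    PySem.Chars.find cs [c] = -1 :=
  (PySem.Chars.find_eq_neg_one_iff cs [c]).mpr (by simpa [List.singleton_infix_iff] using h)

theorem pv_singleton_find_ne {c : Char} {cs : List Char} (h : c ∈ cs) :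
    PySem.Chars.find cs [c] ≠ -1 :=
  (PySem.Chars.find_ne_neg_one_iff cs [c]).mpr ((List.singleton_infix_iff c cs).mpr h)

theorem pv_main_aux (N : Nat) : ∀ cs : List Char, cs.length ≤ N →
    (cs.foldl pvStepA (false, 0, [])).2.2 = pvOrfLens cs := by
  induction N with
  | zero =>
    intro cs h
    have hnil : cs = [] := List.eq_nil_of_length_eq_zero (Nat.le_zero.mp h)
    subst hnil
    rw [pvOrfLens]
    simp [pv_singleton_not_infix (show 'M' ∉ ([] : List Char) by simp)]
  | succ N ih =>
    intro cs hlen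
    by_cases hM : 'M' ∈ cs
    · have hfM := pv_singleton_find_ne hM
      obtain ⟨n, hn, hnlt, hdrop, htake⟩ := pv_find_single cs 'M' hfM
      have hcs : cs = cs.take n ++ 'M' :: cs.drop (n + 1) := by
        conv_lhs => rw [← List.take_append_drop n cs]
        rw [hdrop]
      have hL0 : (cs.foldl pvStepA (false, 0, [])).2.2
          = ((cs.drop (n + 1)).foldl pvStepA (true, 0, [])).2.2 := by
        conv_lhs => rw [hcs]
        rw [List.foldl_append, pv_L1 _ 0 [] htake, List.foldl_cons, pv_step_M]
      by_cases hstar : '*' ∈ cs.drop n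
      · have hfS := pv_singleton_find_ne hstar
        obtain ⟨m, hm, hmlt, hdrop2, htake2⟩ := pv_find_single (cs.drop n) '*' hfS
        have hm1 : 1 ≤ m := by
          rcases Nat.eq_zero_or_pos m with h0 | h1
          · exfalso
            rw [h0, List.drop_zero, hdrop] at hdrop2
            exact absurd (List.cons.inj hdrop2).1 (by decide)
          · exact h1
        have hdlen : (cs.drop n).length = cs.length - n := List.length_drop
        have hrlen : (cs.drop (n + 1)).length = cs.length - (n + 1) := List.length_drop
        have hmler : m - 1 ≤ (cs.drop (n + 1)).length := by omega
        -- decompose the tail r at the '*'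
        have h2' : (cs.drop n).drop m = cs.drop (n + m) := List.drop_drop
        have h3' : (cs.drop n).drop (m + 1) = cs.drop (n + m + 1) := by
          rw [List.drop_drop, ← Nat.add_assoc]
        have hr2 : (cs.drop (n + 1)).drop (m - 1) = '*' :: cs.drop (n + m + 1) := by
          rw [List.drop_drop, show n + 1 + (m - 1) = n + m by omega, ← h2', hdrop2, h3']
        have hmtake : (cs.drop n).take m = 'M' :: (cs.drop (n + 1)).take (m - 1) := by
          conv_lhs => rw [hdrop, show m = (m - 1) + 1 by omega, List.take_succ_cons]
        have htk : '*' ∉ (cs.drop (n + 1)).take (m - 1) := by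
          intro hmem
          exact htake2 (hmtake ▸ List.mem_cons_of_mem _ hmem)
        have hLr : ((cs.drop (n + 1)).foldl pvStepA (true, 0, [])).2.2
            = ((m : Int) - 1) :: ((cs.drop (n + m + 1)).foldl pvStepA (false, 0, [])).2.2 := by
          conv_lhs => rw [← List.take_append_drop (m - 1) (cs.drop (n + 1)), hr2]
          rw [List.foldl_append, pv_L2 _ 0 [] htk, List.foldl_cons, pv_step_star]
          rw [pv_L4 _ _ 0 _, pv_L3]
          simp [List.length_take]
          omega
        have hnle : n ≤ cs.length := le_of_lt hnlt
        have hR : pvOrfLens cs = ((m : Int) - 1) :: pvOrfLens (cs.drop (n + m + 1)) := by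
          rw [pvOrfLens]
          have hmne : ((m : Nat) : Int) ≠ -1 := by omega
          simp only [hn, PySem.Chars.findFrom_natCast cs ['*'] n hnle, hm, if_neg hmne]
          rw [dif_neg (show ¬((n : Nat) : Int) = -1 by omega)]
          rw [dif_neg (show ¬((n : Int) + (m : Int) = -1) by omega)]
          congr 1
          · ring
          · rw [show ((n : Int) + (m : Int) + 1) = ((n + m + 1 : Nat) : Int) by push_cast; ring,
              PySem.List.slice_from_natCast]
        rw [hL0, hLr, hR, ih (cs.drop (n + m + 1)) (by rw [List.length_drop]; omega)]
      · have hnle : n ≤ cs.length := le_of_lt hnlt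
        have hfS0 : PySem.Chars.find (cs.drop n) ['*'] = -1 := pv_singleton_not_infix hstar
        have hnostar : '*' ∉ cs.drop (n + 1) := fun hmem =>
          hstar (hdrop ▸ List.mem_cons_of_mem _ hmem)
        rw [hL0, pv_L2 _ 0 [] hnostar, pvOrfLens]
        simp only [hn, PySem.Chars.findFrom_natCast cs ['*'] n hnle, hfS0]
        rw [dif_neg (show ¬((n : Nat) : Int) = -1 by omega)]
        simp
    · rw [pv_L1 cs 0 [] hM, pvOrfLens]
      simp [pv_singleton_not_infix hM]

-- ===== VERDICT (by name: the statement is the Claim_ definition above) =====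
theorem count_sequences_between_codons_spec : Claim_equal_count_sequences_between_codons := by
  intro ms _
  unfold Spec_count_sequences_between_codons count_sequences_between_codons
    count_sequences_between_codons_alt
  have h : (fun (d : PySem.Dict String (List Int)) (fs : String × String) =>
        d.insert fs.1 (pvLensA fs.2))
      = fun d fs => d.insert fs.1 (pvOrfLens fs.2.toList) := by
    funext d fs
    simp only [pvLensA]
    rw [pv_main_aux fs.2.toList.length fs.2.toList le_rfl]
  rw [h]
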